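-- pv_equiv track=rewrite | github.com/thepratholic/Competitive-Programming | CodeChef/Starters 182/Beautiful_Garden.py | max_plucks
-- ===== SOURCE A (Python) =====
-- def max_plucks(N, K, D, regrowth_times):
--     if K == N:
--         return 0
--
--     available_to_pluck = N - K
--
--
--     regrowth_times.sort()
--
--     total_plucks = 0
--     for i in range(available_to_pluck):
--         T = regrowth_times[i]
--         plucks_for_flower = (D - 1) // T + 1
--         total_plucks += plucks_for_flower
--
--     return total_plucks
-- ===== SOURCE B (Python) =====
-- def max_plucks(N, K, D, regrowth_times):
--     # Selection by repeated min-extraction instead of full sorting.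
--     # Does not mutate regrowth_times (A sorts it in place); return value identical.
--     if K == N:
--         return 0
--     pool = list(regrowth_times)
--     total = 0
--     for _ in range(N - K):
--         t = min(pool)
--         pool.remove(t)
--         total += (D - 1) // t + 1
--     return total
-- ===== Notes on version B (the rewrite author's own statement) =====
-- stated objective: alternative
-- what changed: B replaces A's full sort + indexed scan by selection: it repeatedly extracts the minimum regrowth time N-K times from a working copy, accumulating the pluck count, so no sorted array is ever built (and the input list is not mutated).
import Mathlib
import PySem

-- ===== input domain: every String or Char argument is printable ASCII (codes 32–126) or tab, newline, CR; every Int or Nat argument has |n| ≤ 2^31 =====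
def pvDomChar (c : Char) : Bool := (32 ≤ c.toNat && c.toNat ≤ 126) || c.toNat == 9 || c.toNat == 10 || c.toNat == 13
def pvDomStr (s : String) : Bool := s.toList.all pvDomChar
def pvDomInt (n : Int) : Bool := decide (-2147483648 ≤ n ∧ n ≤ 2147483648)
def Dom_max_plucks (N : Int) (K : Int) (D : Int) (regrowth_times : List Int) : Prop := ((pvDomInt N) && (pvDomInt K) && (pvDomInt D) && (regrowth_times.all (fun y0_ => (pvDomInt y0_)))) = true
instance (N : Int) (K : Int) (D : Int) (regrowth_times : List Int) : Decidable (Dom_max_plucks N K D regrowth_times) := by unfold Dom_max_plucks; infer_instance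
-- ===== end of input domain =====

-- B replaces A's full sort + indexed scan by repeated min-extraction from a working copy
-- (alternative decomposition, not claimed faster). A sorts its list argument in place;
-- B does not mutate it — the equivalence proved here is about the return value only.


-- ===== PORT A =====
-- sort the list, then loop i over range(N-K) summing (D-1)//T + 1 for T = sorted[i];
-- pyGetD's default is never used under Pre_ (the index is in range there).
def max_plucks (N : Int) (K : Int) (D : Int) (regrowth_times : List Int) : Int :=
  if K == N then 0
  else
    let s := PySem.List.sorted regrowth_times (fun x => x) false
    (PySem.List.pyRange 0 (N - K) 1).foldl
      (fun total i => total + (PySem.Int.floordiv (D - 1) (PySem.List.pyGetD s i 0) + 1)) 0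

-- ===== PORT B =====
-- B's loop: N-K times, take the minimum of the pool, remove it, add its pluck count.
-- The 'none' fallthroughs correspond to Python's ValueError from min([]) — outside Pre_.
def pvAltLoop (D : Int) : Nat → List Int → Int → Int
  | 0, _, total => total
  | n + 1, pool, total =>
    match PySem.List.min? pool (fun x => x) with
    | none => total
    | some t =>
      match PySem.List.remove? pool t with
      | none => total
      | some pool' => pvAltLoop D n pool' (total + (PySem.Int.floordiv (D - 1) t + 1))

def max_plucks_alt (N : Int) (K : Int) (D : Int) (regrowth_times : List Int) : Int :=
  if K == N then 0
  else pvAltLoop D (N - K).toNat regrowth_times 0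

-- ===== PRECONDITION & SPEC =====
-- Pre_ excludes exactly the inputs where Python A raises: N-K exceeds the list length
-- (IndexError), or a regrowth time 0 lies among the N-K smallest — i.e. 0 is present and
-- fewer than N-K elements are negative — (ZeroDivisionError).
def Pre_max_plucks (N : Int) (K : Int) (D : Int) (regrowth_times : List Int) : Prop :=
  K = N ∨ N - K ≤ 0 ∨
    (N - K ≤ (regrowth_times.length : Int) ∧
      ¬((0 : Int) ∈ regrowth_times ∧
        ((regrowth_times.countP (fun t => decide (t < 0)) : Int) < N - K)))
instance (N : Int) (K : Int) (D : Int) (regrowth_times : List Int) : Decidable (Pre_max_plucks N K D regrowth_times) := by unfold Pre_max_plucks; infer_instance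
def pvWitness_max_plucks : Int × Int × Int × List Int := (3, 1, 5, [2, 3, 1])

def Spec_max_plucks (N : Int) (K : Int) (D : Int) (regrowth_times : List Int) (out : Int) : Prop := out = max_plucks_alt N K D regrowth_times
instance (N : Int) (K : Int) (D : Int) (regrowth_times : List Int) (out : Int) : Decidable (Spec_max_plucks N K D regrowth_times out) := by unfold Spec_max_plucks; infer_instance

-- ===== CLAIM (what is proved, stated in full; the proofs are below) =====
def Claim_equal_max_plucks : Prop := ∀ (N : Int) (K : Int) (D : Int) (regrowth_times : List Int), Dom_max_plucks N K D regrowth_times → Pre_max_plucks N K D regrowth_times → Spec_max_plucks N K D regrowth_times (max_plucks N K D regrowth_times)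

-- ===== LEMMAS AND PROOFS =====

-- A's indexed loop over the sorted list equals a fold over its first m elements.
theorem pvFoldA_eq_take (D : Int) (xs : List Int) (m : Int) (hm : 0 ≤ m) (hlen : m ≤ (xs.length : Int)) :
    (PySem.List.pyRange 0 m 1).foldl
        (fun total i => total + (PySem.Int.floordiv (D - 1) (PySem.List.pyGetD xs i 0) + 1)) 0
      = (xs.take m.toNat).foldl (fun acc t => acc + (PySem.Int.floordiv (D - 1) t + 1)) 0 := by
  have hlen' : (xs.take m.toNat).length = m.toNat := by
    simp [List.length_take]; omega
  have hr : PySem.List.pyRange 0 m 1 = PySem.List.pyRange 0 (PySem.List.len (xs.take m.toNat)) 1 := by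
    simp [PySem.List.len_eq, hlen']; congr 1; omega
  rw [hr]
  rw [← PySem.List.foldl_pyRange_zero_pyGetD (xs.take m.toNat) 0
        (fun acc t => acc + (PySem.Int.floordiv (D - 1) t + 1)) 0]
  apply PySem.List.foldl_congr_mem
  intro acc j hj
  have hj' := (PySem.List.mem_pyRange_one).1 hj
  rw [PySem.List.len_eq, hlen'] at hj'
  have h1 : PySem.List.pyGetD xs j 0 = xs[j.toNat] := by
    apply PySem.List.pyGetD_eq_getElem <;> omega
  have h2 : PySem.List.pyGetD (xs.take m.toNat) j 0 = (xs.take m.toNat)[j.toNat]'(by omega) := by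
    apply PySem.List.pyGetD_eq_getElem <;> omega
  rw [h1, h2, List.getElem_take]

-- B's min-extraction loop equals a fold over the first n elements of the sorted pool.
theorem pvAltLoop_eq_take (D : Int) :
    ∀ (n : Nat) (pool : List Int) (total : Int), n ≤ pool.length →
      pvAltLoop D n pool total
        = ((PySem.List.sorted pool (fun x => x) false).take n).foldl
            (fun acc t => acc + (PySem.Int.floordiv (D - 1) t + 1)) total := by
  intro n
  induction n with
  | zero => intro pool total _; simp [pvAltLoop]
  | succ n ih =>
    intro pool total hlen
    obtain ⟨h, t, hs⟩ : ∃ h t, PySem.List.sorted pool (fun x => x) false = h :: t := by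
      rcases hsrt : PySem.List.sorted pool (fun x => x) false with _ | ⟨h, t⟩
      · exfalso
        have := (PySem.List.sorted_eq_nil_iff (xs := pool) (key := fun x => x) (rev := false)).1 hsrt
        subst this; simp at hlen
      · exact ⟨h, t, rfl⟩
    have hperm : (h :: t).Perm pool := hs ▸ PySem.List.sorted_perm pool (fun x => x) false
    have hhmem : h ∈ pool := hperm.mem_iff.1 (by simp)
    obtain ⟨mn, hmn⟩ : ∃ mn, PySem.List.min? pool (fun x => x) = some mn := by
      rcases hm : PySem.List.min? pool (fun x => x) with _ | mn
      · exfalso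
        have := (PySem.List.min?_eq_none_iff (xs := pool) (key := fun x => x)).1 hm
        subst this; simp at hlen
      · exact ⟨mn, rfl⟩
    have hmnmem : mn ∈ pool := PySem.List.min?_mem hmn
    have hmn_eq : mn = h := by
      have h1 : mn ≤ h := PySem.List.min?_isMin hmn h hhmem
      have h2 : h ≤ mn := PySem.List.key_head_sorted_le pool (fun x => x) hs mn hmnmem
      omega
    have hrem : PySem.List.remove? pool mn = some (pool.erase mn) :=
      PySem.List.remove?_eq_some_erase pool mn hmnmem
    have herase_perm : t.Perm (pool.erase h) := by
      have := hperm.erase h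
      simpa using this
    have hpw : t.Pairwise (fun a b : Int => a ≤ b) := by
      have := PySem.List.sorted_pairwise pool (fun x => x)
      rw [hs] at this
      simpa using this.of_cons
    have hsort_erase : PySem.List.sorted (pool.erase h) (fun x => x) false = t :=
      PySem.List.sorted_id_eq_of_perm_of_pairwise (pool.erase h) t herase_perm hpw
    have hlen_erase : n ≤ (pool.erase h).length := by
      have := List.length_erase_of_mem hhmem
      omega
    rw [hmn_eq] at hrem
    simp only [pvAltLoop, hmn, hmn_eq, hrem]
    rw [ih (pool.erase h) _ hlen_erase, hsort_erase, hs]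
    simp [List.foldl_cons]

-- ===== VERDICT (by name: the statement is the Claim_ definition above) =====
theorem max_plucks_spec : Claim_equal_max_plucks := by
  intro N K D rt _ hpre
  unfold Spec_max_plucks max_plucks max_plucks_alt
  by_cases hKN : K = N
  · simp [hKN]
  · have hbeq : (K == N) = false := by simp [hKN]
    rw [hbeq]
    simp only [Bool.false_eq_true, if_false]
    by_cases hm : N - K ≤ 0
    · have h1 : PySem.List.pyRange 0 (N - K) 1 = [] := PySem.List.pyRange_one_eq_nil hm
      have h2 : (N - K).toNat = 0 := by omega
      rw [h1, h2]; simp [pvAltLoop]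
    · have hlen : N - K ≤ (rt.length : Int) := by
        rcases hpre with h | h | ⟨h, _⟩ <;> omega
      rw [pvFoldA_eq_take D (PySem.List.sorted rt (fun x => x) false) (N - K) (by omega) (by
            rw [PySem.List.length_sorted]; omega)]
      rw [pvAltLoop_eq_take D (N - K).toNat rt 0 (by omega)]
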